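-- pv_equiv track=rewrite | github.com/jJup0/LeetCode | Hard/2009. Minimum Number of Operations to Make Array Continuous.py | minOperations_sliding_window2
-- ===== SOURCE A (Python) =====
-- def minOperations_sliding_window2(nums: list[int]) -> int:
--     n = len(nums)
--     unique_sorted_nums = sorted(set(nums))
--     best_consecutive_numbers = i = 0
--     for j, num in enumerate(unique_sorted_nums):
--         if num - unique_sorted_nums[i] >= n:
--             i += 1
--         best_consecutive_numbers = max(best_consecutive_numbers, j - i + 1)
--     return n - best_consecutive_numbers
-- ===== SOURCE B (Python) =====
-- def minOperations_sliding_window2(nums: list[int]) -> int: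
--     n = len(nums)
--     unique = sorted(set(nums))
--
--     def bisect_left(a, x):
--         # standard bisect_left, written out because we import nothing
--         lo, hi = 0, len(a)
--         while lo < hi:
--             mid = (lo + hi) // 2
--             if a[mid] < x:
--                 lo = mid + 1
--             else:
--                 hi = mid
--         return lo
--
--     best = 0
--     for j, num in enumerate(unique):
--         idx = bisect_left(unique, num - n + 1)
--         best = max(best, j - idx + 1)
--     return n - best
-- ===== Notes on version B (the rewrite author's own statement) =====
-- stated objective: alternative
-- what changed: Replaces A's stateful lagging left pointer (advanced by at most one per step) with a stateless per-index binary search: for each j the window start is recomputed as bisect_left(unique, unique[j]-n+1), so no pointer state is carried between iterations.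
import Mathlib
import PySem

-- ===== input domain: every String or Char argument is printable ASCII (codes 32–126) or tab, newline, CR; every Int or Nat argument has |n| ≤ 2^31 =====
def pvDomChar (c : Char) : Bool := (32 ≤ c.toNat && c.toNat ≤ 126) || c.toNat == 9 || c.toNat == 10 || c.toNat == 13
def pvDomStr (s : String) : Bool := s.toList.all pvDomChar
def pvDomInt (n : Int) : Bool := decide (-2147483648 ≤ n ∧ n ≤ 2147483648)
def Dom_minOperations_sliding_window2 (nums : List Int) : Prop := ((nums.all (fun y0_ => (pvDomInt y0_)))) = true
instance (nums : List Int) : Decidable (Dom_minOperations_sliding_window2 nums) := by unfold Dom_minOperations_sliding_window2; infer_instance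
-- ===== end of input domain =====

-- B replaces A's stateful lagging left pointer by a stateless per-index binary search
-- (bisect_left recomputed for every j); same asymptotic cost, no pointer state.

-- ===== PORT A =====
-- A's loop: state (best, i); `unique_sorted_nums[i]` is always in range (i ≤ j), so getD's
-- default is never read.
def minOperations_sliding_window2 (nums : List Int) : Int :=
  let n : Int := nums.length
  let u : List Int := PySem.List.sorted (PySem.Set.ofList nums) (fun x => x)
  let st := (PySem.List.enumerate u).foldl
      (fun (st : Int × Nat) (je : Int × Int) =>
        let i := if je.2 - u.getD st.2 0 ≥ n then st.2 + 1 else st.2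
        (max st.1 (je.1 - (i : Int) + 1), i)) (0, 0)
  n - st.1

-- ===== PORT B =====
-- Source B's hand-written bisect_left (it can import nothing); `a[mid]` is always in range
-- (lo ≤ mid < hi ≤ len a at every call), so getD's default is never read; Python's
-- (lo+hi)//2 on nonnegative ints is Nat division.
def pvBisectLeft (a : List Int) (x : Int) (lo hi : Nat) : Nat :=
  if _h : lo < hi then
    let mid := (lo + hi) / 2
    if a.getD mid 0 < x then pvBisectLeft a x (mid + 1) hi
    else pvBisectLeft a x lo mid
  else lo
termination_by hi - lo
decreasing_by all_goals omega

def minOperations_sliding_window2_alt (nums : List Int) : Int :=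
  let n : Int := nums.length
  let u : List Int := PySem.List.sorted (PySem.Set.ofList nums) (fun x => x)
  let best := (PySem.List.enumerate u).foldl
      (fun (best : Int) (je : Int × Int) =>
        max best (je.1 - (pvBisectLeft u (je.2 - n + 1) 0 u.length : Int) + 1)) 0
  n - best

-- ===== PRECONDITION & SPEC =====
def Spec_minOperations_sliding_window2 (nums : List Int) (out : Int) : Prop := out = minOperations_sliding_window2_alt nums
instance (nums : List Int) (out : Int) : Decidable (Spec_minOperations_sliding_window2 nums out) := by unfold Spec_minOperations_sliding_window2; infer_instance

-- ===== CLAIM (what is proved, stated in full; the proofs are below) =====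
def Claim_equal_minOperations_sliding_window2 : Prop := ∀ (nums : List Int), Dom_minOperations_sliding_window2 nums → Spec_minOperations_sliding_window2 nums (minOperations_sliding_window2 nums)

-- ===== LEMMAS AND PROOFS =====

theorem pvBisectLeft_spec (u : List Int) (x : Int)
    (hs : ∀ p q : Nat, p ≤ q → q < u.length → u.getD p 0 ≤ u.getD q 0)
    (lo hi : Nat) (hhi : hi ≤ u.length) (hlo : lo ≤ hi)
    (hL : ∀ k, k < lo → u.getD k 0 < x)
    (hR : ∀ k, hi ≤ k → k < u.length → x ≤ u.getD k 0) :
    lo ≤ pvBisectLeft u x lo hi ∧ pvBisectLeft u x lo hi ≤ hi ∧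
      (∀ k, k < pvBisectLeft u x lo hi → u.getD k 0 < x) ∧
      (∀ k, pvBisectLeft u x lo hi ≤ k → k < u.length → x ≤ u.getD k 0) := by
  fun_induction pvBisectLeft u x lo hi with
  | case1 lo hi h mid hmid ih =>
      have hmidlt : mid < hi := by omega
      have hL' : ∀ k, k < mid + 1 → u.getD k 0 < x := by
        intro k hk
        by_cases hklo : k < lo
        · exact hL k hklo
        · exact lt_of_le_of_lt (hs k mid (by omega) (by omega)) hmid
      obtain ⟨h1, h2, h3, h4⟩ := ih hhi (by omega) hL' hR
      exact ⟨by omega, h2, h3, h4⟩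
  | case2 lo hi h mid hmid ih =>
      have hmidlt : mid < hi := by omega
      have hR' : ∀ k, mid ≤ k → k < u.length → x ≤ u.getD k 0 := by
        intro k hk hk2
        exact le_trans (not_lt.mp hmid) (hs mid k hk hk2)
      obtain ⟨h1, h2, h3, h4⟩ := ih (by omega) (by omega) hL hR'
      exact ⟨h1, by omega, h3, h4⟩
  | case3 lo hi h =>
      exact ⟨le_refl _, hlo, hL, fun k hk hk2 => hR k (by omega) hk2⟩

-- full-range bisect facts
theorem pvBL_full (u : List Int) (x : Int)
    (hs : ∀ p q : Nat, p ≤ q → q < u.length → u.getD p 0 ≤ u.getD q 0) :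
    pvBisectLeft u x 0 u.length ≤ u.length ∧
      (∀ k, k < pvBisectLeft u x 0 u.length → u.getD k 0 < x) ∧
      (∀ k, pvBisectLeft u x 0 u.length ≤ k → k < u.length → x ≤ u.getD k 0) := by
  obtain ⟨_, h2, h3, h4⟩ := pvBisectLeft_spec u x hs 0 u.length (le_refl _) (Nat.zero_le _)
    (by omega) (by intro k hk hk2; omega)
  exact ⟨h2, h3, h4⟩


def pvStepA (u : List Int) (n : Int) (st : Int × Nat) (j : Int) : Int × Nat :=
  let i := if PySem.List.pyGetD u j 0 - u.getD st.2 0 ≥ n then st.2 + 1 else st.2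
  (max st.1 (j - (i : Int) + 1), i)

def pvStepB (u : List Int) (n : Int) (best : Int) (j : Int) : Int :=
  max best (j - (pvBisectLeft u (PySem.List.pyGetD u j 0 - n + 1) 0 u.length : Int) + 1)

def pvSA (u : List Int) (n : Int) (t : Nat) : Int × Nat :=
  (PySem.List.pyRange 0 (t : Int)).foldl (pvStepA u n) (0, 0)

def pvSB (u : List Int) (n : Int) (t : Nat) : Int :=
  (PySem.List.pyRange 0 (t : Int)).foldl (pvStepB u n) 0

def pvBl (u : List Int) (n : Int) (j : Nat) : Nat :=
  pvBisectLeft u (u.getD j 0 - n + 1) 0 u.length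

theorem pvSA_succ (u : List Int) (n : Int) (t : Nat) :
    pvSA u n (t + 1) = pvStepA u n (pvSA u n t) (t : Int) := by
  unfold pvSA
  rw [show ((t + 1 : Nat) : Int) = (t : Int) + 1 by push_cast; ring,
      PySem.List.pyRange_one_succ_right (by positivity), List.foldl_append]
  rfl

theorem pvSB_succ (u : List Int) (n : Int) (t : Nat) :
    pvSB u n (t + 1) = pvStepB u n (pvSB u n t) (t : Int) := by
  unfold pvSB
  rw [show ((t + 1 : Nat) : Int) = (t : Int) + 1 by push_cast; ring,
      PySem.List.pyRange_one_succ_right (by positivity), List.foldl_append]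
  rfl



theorem pvStepA_fst (u : List Int) (n : Int) (st : Int × Nat) (j : Int) :
    (pvStepA u n st j).1
      = max st.1 (j - ((if PySem.List.pyGetD u j 0 - u.getD st.2 0 ≥ n then st.2 + 1 else st.2 : Nat) : Int) + 1) := rfl

theorem pvStepA_snd (u : List Int) (n : Int) (st : Int × Nat) (j : Int) :
    (pvStepA u n st j).2
      = (if PySem.List.pyGetD u j 0 - u.getD st.2 0 ≥ n then st.2 + 1 else st.2) := rfl

theorem pvStepB_eq (u : List Int) (n : Int) (best : Int) (j : Int) :
    pvStepB u n best j
      = max best (j - (pvBisectLeft u (PySem.List.pyGetD u j 0 - n + 1) 0 u.length : Int) + 1) := rfl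

theorem pv_inv (u : List Int) (n : Int) (hn : 1 ≤ n)
    (hs : ∀ p q : Nat, p ≤ q → q < u.length → u.getD p 0 ≤ u.getD q 0) :
    ∀ t : Nat, 1 ≤ t → t ≤ u.length →
      (pvSA u n t).1 = pvSB u n t ∧
      (pvSA u n t).2 ≤ pvBl u n (t - 1) ∧
      (pvSA u n t).2 < t ∧
      ((t : Int) - 1 - ((pvSA u n t).2 : Int) + 1 ≤ (pvSA u n t).1) := by
  intro t
  induction t with
  | zero => intro h; exact absurd h (by omega)
  | succ t ih =>
    intro _ hm
    have hUlen : t < u.length := by omega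
    have hblP : ∀ j : Nat, pvBl u n j ≤ u.length ∧
        (∀ k, k < pvBl u n j → u.getD k 0 < u.getD j 0 - n + 1) ∧
        (∀ k, pvBl u n j ≤ k → k < u.length → u.getD j 0 - n + 1 ≤ u.getD k 0) :=
      fun j => pvBL_full u _ hs
    rw [pvSA_succ, pvSB_succ, pvStepA_fst, pvStepA_snd, pvStepB_eq,
        PySem.List.pyGetD_natCast, Nat.add_sub_cancel]
    have hblRw : pvBisectLeft u (u.getD t 0 - n + 1) 0 u.length = pvBl u n t := rfl
    rw [hblRw]
    by_cases ht : t = 0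
    · subst ht
      rw [show pvSA u n 0 = (0, 0) from rfl, show pvSB u n 0 = 0 from rfl]
      have hbl0 : pvBl u n 0 = 0 := by
        by_contra hcon
        have := (hblP 0).2.1 0 (by omega)
        omega
      rw [if_neg (by simp; omega)]
      refine ⟨by simp [hbl0], by omega, by omega, by simp⟩
    · have h1t : 1 ≤ t := by omega
      obtain ⟨hEq, hle, hlt, hbest⟩ := ih h1t (by omega)
      have hmono : pvBl u n (t - 1) ≤ pvBl u n t := by
        by_contra hcon
        push Not at hcon
        have hxle : u.getD (t - 1) 0 ≤ u.getD t 0 := hs (t - 1) t (by omega) hUlen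
        have h1 := (hblP (t - 1)).2.1 (pvBl u n t) hcon
        have h2 := (hblP t).2.2 (pvBl u n t) (le_refl _) (by have := (hblP (t - 1)).1; omega)
        omega
      by_cases hc : u.getD t 0 - u.getD (pvSA u n t).2 0 ≥ n
      · rw [if_pos hc]
        have hib : (pvSA u n t).2 + 1 ≤ pvBl u n t := by
          by_contra hcon
          push Not at hcon
          have := (hblP t).2.2 (pvSA u n t).2 (by omega) (by omega)
          omega
        have hsz : (t : Int) - (((pvSA u n t).2 + 1 : Nat) : Int) + 1 ≤ (pvSA u n t).1 := by
          push_cast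
          omega
        have hszB : (t : Int) - ((pvBl u n t : Nat) : Int) + 1 ≤ (pvSA u n t).1 := by
          have h' : ((pvSA u n t).2 + 1 : Int) ≤ (pvBl u n t : Int) := by exact_mod_cast hib
          push_cast at hsz
          omega
        refine ⟨?_, by omega, by omega, ?_⟩
        · rw [max_eq_left (by push_cast at hsz ⊢; omega), ← hEq,
              max_eq_left (by omega)]
        · rw [max_eq_left (by push_cast at hsz ⊢; omega)]
          push_cast
          omega
      · rw [if_neg hc]
        have hieq : (pvSA u n t).2 = pvBl u n t := by
          have hub : pvBl u n t ≤ (pvSA u n t).2 := by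
            by_contra hcon
            push Not at hcon
            have := (hblP t).2.1 (pvSA u n t).2 hcon
            omega
          omega
        refine ⟨by rw [hEq, hieq], by omega, by omega, by push_cast; omega⟩

theorem pv_main (nums : List Int) :
    minOperations_sliding_window2 nums = minOperations_sliding_window2_alt nums := by
  have hA : minOperations_sliding_window2 nums
      = (nums.length : Int) - (pvSA (PySem.List.sorted (PySem.Set.ofList nums) (fun x => x)) (nums.length : Int) (PySem.List.sorted (PySem.Set.ofList nums) (fun x => x)).length).1 := by
    unfold minOperations_sliding_window2 pvSA
    simp only [PySem.List.enumerate_eq_map_pyRange _ (0 : Int), List.foldl_map]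
    rfl
  have hB : minOperations_sliding_window2_alt nums
      = (nums.length : Int) - pvSB (PySem.List.sorted (PySem.Set.ofList nums) (fun x => x)) (nums.length : Int) (PySem.List.sorted (PySem.Set.ofList nums) (fun x => x)).length := by
    unfold minOperations_sliding_window2_alt pvSB
    simp only [PySem.List.enumerate_eq_map_pyRange _ (0 : Int), List.foldl_map]
    rfl
  set u := PySem.List.sorted (PySem.Set.ofList nums) (fun x => x) with hu
  have hple : u.Pairwise (· ≤ ·) := PySem.List.sorted_pairwise _ _
  have hs : ∀ p q : Nat, p ≤ q → q < u.length → u.getD p 0 ≤ u.getD q 0 := by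
    intro p q hpq hq
    rcases Nat.lt_or_ge p q with hlt | hge
    · rw [List.getD_eq_getElem _ _ (by omega), List.getD_eq_getElem _ _ hq]
      exact List.pairwise_iff_getElem.mp hple p q (by omega) hq hlt
    · have : p = q := by omega
      subst this
      exact le_refl _
  rcases List.eq_nil_or_concat nums with hnil | _
  · subst hnil
    rfl
  · have hn : 1 ≤ (nums.length : Int) := by
      rcases nums with _ | _
      · simp_all
      · simp
    rcases Nat.eq_zero_or_pos u.length with h0 | hpos
    · rw [hA, hB, h0]
      rfl
    · rw [hA, hB, (pv_inv u (nums.length : Int) hn hs u.length hpos (le_refl _)).1]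


-- ===== VERDICT (by name: the statement is the Claim_ definition above) =====
theorem minOperations_sliding_window2_spec : Claim_equal_minOperations_sliding_window2 := by
  intro nums _
  unfold Spec_minOperations_sliding_window2
  exact pv_main nums
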